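-- pv_equiv track=rewrite | github.com/jtc1246/useful-tools | pdf_searcher.py | search_strict
-- ===== SOURCE A (Python) =====
-- def search_strict(pdf_text: list[str], text: str) -> bool:
--     # 区分大小写
--     old = text
--     text = text.replace('  ', ' ')
--     while old != text:
--         old = text
--         text = text.replace('  ', ' ')
--     for page in pdf_text:
--         if (page.find(text) != -1):
--             return True
--     return False
-- ===== SOURCE B (Python) =====
-- def search_strict(pdf_text: list[str], text: str) -> bool:
--     # 区分大小写; single left-to-right pass collapses runs of spaces
--     res = []
--     prev_space = False
--     for ch in text:
--         if ch == ' ':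
--             if not prev_space:
--                 res.append(ch)
--             prev_space = True
--         else:
--             res.append(ch)
--             prev_space = False
--     needle = ''.join(res)
--     return any(needle in page for page in pdf_text)
-- ===== Notes on version B (the rewrite author's own statement) =====
-- stated objective: alternative
-- what changed: A normalizes the needle by repeatedly calling replace(' ',' ') until a fixed point; B collapses space runs in one left-to-right pass with a prev-was-space flag and then searches the pages with any(needle in page).
import Mathlib
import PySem

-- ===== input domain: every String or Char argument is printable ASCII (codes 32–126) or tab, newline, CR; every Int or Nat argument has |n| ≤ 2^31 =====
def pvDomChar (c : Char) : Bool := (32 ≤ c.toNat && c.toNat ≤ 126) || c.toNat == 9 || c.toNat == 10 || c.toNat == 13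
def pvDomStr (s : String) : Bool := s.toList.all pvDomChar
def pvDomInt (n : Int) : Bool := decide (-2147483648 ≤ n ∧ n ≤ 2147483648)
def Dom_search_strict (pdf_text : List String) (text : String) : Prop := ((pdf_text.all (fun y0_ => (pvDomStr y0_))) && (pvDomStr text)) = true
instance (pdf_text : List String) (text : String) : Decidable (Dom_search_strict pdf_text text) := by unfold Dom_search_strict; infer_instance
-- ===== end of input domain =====

-- B replaces A's fixed-point loop of whole-string `replace('  ',' ')` passes by ONE
-- left-to-right scan with a prev-was-space flag; return values proved equal on all inputs.

-- ===== PORT A =====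
-- proof-helper characterisation of one `replace('  ',' ')` pass, used for pvLoopA's termination
def pvRep1 : List Char → List Char
  | ' ' :: ' ' :: t => ' ' :: pvRep1 t
  | c :: t => c :: pvRep1 t
  | [] => []

theorem pvRep1_sp (t : List Char) : pvRep1 (' ' :: ' ' :: t) = ' ' :: pvRep1 t := rfl

theorem pvRep1_nil : pvRep1 ([] : List Char) = [] := rfl

theorem pvRep1_cons (c : Char) (t : List Char)
    (h : ∀ t', c = ' ' → t = ' ' :: t' → False) : pvRep1 (c :: t) = c :: pvRep1 t := by
  rw [pvRep1.eq_def]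
  split
  · rename_i t' heq
    rw [List.cons.injEq] at heq
    exact absurd (h t' heq.1 heq.2) not_false
  · rename_i c' t' _ heq
    injection heq with h1 h2
    rw [h1, h2]
  · rename_i heq
    simp at heq

theorem pvRep1_length_le (l : List Char) : (pvRep1 l).length ≤ l.length := by
  induction l using pvRep1.induct with
  | case1 t ih => rw [pvRep1_sp]; simp only [List.length_cons]; omega
  | case2 c t h ih => rw [pvRep1_cons c t h]; simp only [List.length_cons]; omega
  | case3 => rw [pvRep1_nil]

theorem pvRep1_ne_length_lt (l : List Char) (h : pvRep1 l ≠ l) : (pvRep1 l).length < l.length := by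
  induction l using pvRep1.induct with
  | case1 t ih =>
    have := pvRep1_length_le t
    rw [pvRep1_sp]; simp only [List.length_cons]; omega
  | case2 c t hg ih =>
    rw [pvRep1_cons c t hg] at h ⊢
    have hne : pvRep1 t ≠ t := by intro he; exact h (by rw [he])
    have := ih hne
    simp only [List.length_cons]; omega
  | case3 => rw [pvRep1_nil] at h; exact absurd rfl h

theorem pvReplace_go_eq (fuel : Nat) (l acc : List Char) (h : l.length ≤ fuel) :
    PySem.Chars.replace.go [' ', ' '] [' '] fuel l acc = acc.reverse ++ pvRep1 l := by
  induction fuel generalizing l acc with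
  | zero =>
    have : l = [] := List.eq_nil_of_length_eq_zero (Nat.le_zero.mp h)
    subst this; simp [PySem.Chars.replace.go, pvRep1_nil]
  | succ n ih =>
    match l with
    | [] => simp [PySem.Chars.replace.go, pvRep1_nil]
    | [c] =>
      have hp : List.isPrefixOf [' ', ' '] [c] = false := by simp [List.isPrefixOf]
      simp only [PySem.Chars.replace.go, hp, Bool.false_eq_true, if_false]
      rw [ih [] (c :: acc) (by simp)]
      rw [pvRep1_cons c [] (fun t' _ ht => by simp at ht)]
      simp [pvRep1_nil]
    | c1 :: c2 :: t2 =>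
      by_cases hd : c1 = ' ' ∧ c2 = ' '
      · obtain ⟨rfl, rfl⟩ := hd
        have hp : List.isPrefixOf [' ', ' '] (' ' :: ' ' :: t2) = true := by
          simp [List.isPrefixOf]
        simp only [PySem.Chars.replace.go, hp, if_true]
        simpa [pvRep1_sp] using ih t2 (' ' :: acc) (by simp at h ⊢; omega)
      · have hp : List.isPrefixOf [' ', ' '] (c1 :: c2 :: t2) = false := by
          simp only [List.isPrefixOf, Bool.and_true,
            Bool.and_eq_false_iff, beq_eq_false_iff_ne, ne_eq]
          by_cases h1 : c1 = ' '
          · right; intro h2; exact hd ⟨h1, h2.symm⟩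
          · left; intro h1'; exact h1 h1'.symm
        simp only [PySem.Chars.replace.go, hp, Bool.false_eq_true, if_false]
        rw [ih (c2 :: t2) (c1 :: acc) (by simp at h ⊢; omega)]
        rw [pvRep1_cons c1 (c2 :: t2) (by
          intro t' h1 ht
          rw [List.cons.injEq] at ht
          exact hd ⟨h1, ht.1⟩)]
        simp

theorem pvReplace_eq_rep1 (l : List Char) :
    PySem.Chars.replace l [' ', ' '] [' '] = pvRep1 l := by
  simp only [PySem.Chars.replace]
  rw [if_neg (by simp)]
  simpa using pvReplace_go_eq l.length l [] le_rfl

theorem pvStrReplace_toList (s : String) :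
    (PySem.Str.replace s "  " " ").toList = pvRep1 s.toList := by
  simp [PySem.Str.replace, pvReplace_eq_rep1]

theorem pvLoopA_dec (old t : String) (heq : t = PySem.Str.replace old "  " " ")
    (hne : ¬ old = t) : t.length < old.length := by
  have h1 : t.toList = pvRep1 old.toList := by rw [heq]; exact pvStrReplace_toList old
  have h2 : pvRep1 old.toList ≠ old.toList := by
    intro he
    exact hne (String.toList_inj.mp (by rw [h1, he])).symm
  have h3 : t.toList.length < old.toList.length := by
    rw [h1]; exact pvRep1_ne_length_lt old.toList h2
  simpa using h3

-- the while loop: text = old.replace('  ',' '); while old != text: old = text; text = text.replace('  ',' ')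
def pvLoopA (old : String) : String :=
  let t := PySem.Str.replace old "  " " "
  if old = t then t else pvLoopA t
termination_by old.length
decreasing_by exact pvLoopA_dec old _ rfl (by assumption)

-- the for-page loop with early return
def pvFindLoop (pages : List String) (t : String) : Bool :=
  match pages with
  | [] => false
  | page :: rest => if PySem.Str.find page t ≠ -1 then true else pvFindLoop rest t

def search_strict (pdf_text : List String) (text : String) : Bool :=
  pvFindLoop pdf_text (pvLoopA text)

-- ===== PORT B =====
-- the single scan of Source B: skip a space whose predecessor (prev_space flag) was a space
def pvSqueeze (prev : Bool) : List Char → List Char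
  | [] => []
  | c :: t =>
    if c = ' ' then
      (if prev then pvSqueeze true t else ' ' :: pvSqueeze true t)
    else c :: pvSqueeze false t

def search_strict_alt (pdf_text : List String) (text : String) : Bool :=
  let needle := String.ofList (pvSqueeze false text.toList)
  pdf_text.any (fun page => PySem.Str.isIn needle page)

-- ===== PRECONDITION & SPEC =====
def Spec_search_strict (pdf_text : List String) (text : String) (out : Bool) : Prop := out = search_strict_alt pdf_text text
instance (pdf_text : List String) (text : String) (out : Bool) : Decidable (Spec_search_strict pdf_text text out) := by unfold Spec_search_strict; infer_instance

-- ===== CLAIM (what is proved, stated in full; the proofs are below) =====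
def Claim_equal_search_strict : Prop := ∀ (pdf_text : List String) (text : String), Dom_search_strict pdf_text text → Spec_search_strict pdf_text text (search_strict pdf_text text)

-- ===== LEMMAS AND PROOFS =====

-- squeezing is invariant under one replace pass
theorem pvSqueeze_rep1 (l : List Char) : ∀ p, pvSqueeze p (pvRep1 l) = pvSqueeze p l := by
  induction l using pvRep1.induct with
  | case1 t ih =>
    intro p
    rw [pvRep1_sp]
    cases p <;> simp [pvSqueeze, ih]
  | case2 c t h ih =>
    intro p
    rw [pvRep1_cons c t h]
    simp only [pvSqueeze]
    split_ifs <;> simp [ih]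
  | case3 => intro p; rw [pvRep1_nil]

-- a fixpoint of the replace pass is already squeezed (given the flag is consistent with the head)
theorem pvSqueeze_of_fix (l : List Char) (h : pvRep1 l = l) :
    ∀ p, (p = true → ¬ ∃ t, l = ' ' :: t) → pvSqueeze p l = l := by
  induction l using pvRep1.induct with
  | case1 t ih =>
    rw [pvRep1_sp] at h
    rw [List.cons.injEq] at h
    have h1 := pvRep1_length_le t
    have h2 : (pvRep1 t).length = (' ' :: t).length := by rw [h.2]
    simp only [List.length_cons] at h2
    omega
  | case2 c t hne ih =>
    intro p hp
    rw [pvRep1_cons c t hne] at h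
    rw [List.cons.injEq] at h
    have ht := h.2
    by_cases hc : c = ' '
    · subst hc
      have hflag : p = false := by
        cases p
        · rfl
        · exact absurd ⟨t, rfl⟩ (hp rfl)
      subst hflag
      have hthead : ¬ ∃ t', t = ' ' :: t' := by
        rintro ⟨t', rfl⟩
        exact hne t' rfl rfl
      simp only [pvSqueeze, if_true, Bool.false_eq_true, if_false, List.cons.injEq, true_and]
      exact ih ht true (fun _ => hthead)
    · simp only [pvSqueeze, if_neg hc, List.cons.injEq, true_and]
      exact ih ht false (by simp)
  | case3 => intro p _; simp [pvSqueeze]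

theorem pvLoopA_eq (s : String) : (pvLoopA s).toList = pvSqueeze false s.toList := by
  induction s using pvLoopA.induct with
  | case1 old _t heq =>
    have heq' : old = PySem.Str.replace old "  " " " := heq
    rw [pvLoopA, if_pos heq, ← heq']
    have hfix : pvRep1 old.toList = old.toList := by
      rw [← pvStrReplace_toList, ← heq']
    exact (pvSqueeze_of_fix old.toList hfix false (by simp)).symm
  | case2 old _t hne ih =>
    rw [pvLoopA, if_neg hne, ih, pvStrReplace_toList]
    exact pvSqueeze_rep1 old.toList false

theorem pvFindLoop_eq (pages : List String) (t : String) :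
    pvFindLoop pages t = pages.any (fun page => PySem.Str.isIn t page) := by
  induction pages with
  | nil => simp [pvFindLoop]
  | cons page rest ih =>
    simp only [pvFindLoop, List.any_cons, ih]
    by_cases h : t.toList <:+: page.toList
    · rw [if_pos ((PySem.Str.find_ne_neg_one_iff page t).mpr h)]
      rw [(PySem.Str.isIn_iff_infix t page).mpr h]
      simp
    · rw [if_neg (fun hf => h ((PySem.Str.find_ne_neg_one_iff page t).mp hf))]
      have hi : PySem.Str.isIn t page = false := by
        cases hii : PySem.Str.isIn t page
        · rfl
        · exact absurd ((PySem.Str.isIn_iff_infix t page).mp hii) h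
      rw [hi]
      simp

-- ===== VERDICT (by name: the statement is the Claim_ definition above) =====
theorem search_strict_spec : Claim_equal_search_strict := by
  intro pdf_text text _
  unfold Spec_search_strict search_strict search_strict_alt
  have hneedle : pvLoopA text = String.ofList (pvSqueeze false text.toList) := by
    apply String.toList_inj.mp
    rw [pvLoopA_eq]
    simp
  rw [hneedle, pvFindLoop_eq]
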